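-- pv_equiv track=rewrite | github.com/reza-asad/3DSSR | models/LearningBased/scene_dataset.py | map_cat_to_objects
-- ===== SOURCE A (Python) =====
-- def map_cat_to_objects(cats, graph, source_node):
--     cat_to_objects = {cat: [] for cat in cats}
--     for node, node_info in graph.items():
--         if node != source_node:
--             cat = node_info['category'][0]
--             if cat in cats:
--                 cat_to_objects[cat].append(node)
--
--     return cat_to_objects
-- ===== SOURCE B (Python) =====
-- def map_cat_to_objects(cats, graph, source_node):
--     return {cat: [node for node, info in graph.items()
--                   if node != source_node and info['category'][0] == cat]
--             for cat in cats}
-- ===== Notes on version B (the rewrite author's own statement) =====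
-- stated objective: alternative
-- what changed: Inverts the iteration: instead of one pass over the graph routing each node into its pre-built category bucket, B builds the dict as a nested comprehension with categories as the outer axis, filtering the graph once per category.
import Mathlib
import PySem

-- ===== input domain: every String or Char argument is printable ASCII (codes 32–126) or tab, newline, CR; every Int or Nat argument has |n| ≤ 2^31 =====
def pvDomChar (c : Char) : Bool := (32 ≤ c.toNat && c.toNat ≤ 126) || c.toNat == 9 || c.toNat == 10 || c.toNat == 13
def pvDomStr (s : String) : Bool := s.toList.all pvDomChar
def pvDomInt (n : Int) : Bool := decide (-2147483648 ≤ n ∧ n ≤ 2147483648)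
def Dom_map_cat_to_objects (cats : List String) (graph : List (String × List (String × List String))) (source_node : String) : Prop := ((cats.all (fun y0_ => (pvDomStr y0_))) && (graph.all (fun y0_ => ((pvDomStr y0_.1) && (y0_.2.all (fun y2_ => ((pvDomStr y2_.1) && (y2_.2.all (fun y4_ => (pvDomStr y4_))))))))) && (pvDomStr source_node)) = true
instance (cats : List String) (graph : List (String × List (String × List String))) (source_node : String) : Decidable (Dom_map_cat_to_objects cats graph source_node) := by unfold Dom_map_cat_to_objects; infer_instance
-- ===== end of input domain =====

-- B replaces A's single bucket-routing pass over the graph by a per-category filter of the graph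
-- (categories as the outer axis): an alternative decomposition, same result; no speed claim.

-- ===== PORT A =====
-- node_info['category'][0]; the .getD defaults are only reached where Python raises (excluded by Pre_)
def pvCatOf (info : List (String × List String)) : String :=
  (PySem.List.pyGet? (((PySem.Dict.mk info).get? "category").getD []) 0).getD ""

def map_cat_to_objects (cats : List String) (graph : List (String × List (String × List String))) (source_node : String) : List (String × List String) :=
  (graph.foldl (fun d p =>
      if p.1 ≠ source_node then
        if pvCatOf p.2 ∈ cats then d.modify (pvCatOf p.2) [] (· ++ [p.1]) else d
      else d)
    (cats.foldl (fun d c => d.insert c ([] : List String)) PySem.Dict.empty)).items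

-- ===== PORT B =====
def map_cat_to_objects_alt (cats : List String) (graph : List (String × List (String × List String))) (source_node : String) : List (String × List String) :=
  (cats.foldl (fun d c =>
      d.insert c ((graph.filter (fun p => p.1 ≠ source_node ∧ pvCatOf p.2 = c)).map (·.1)))
    (PySem.Dict.empty : PySem.Dict String (List String))).items

-- ===== PRECONDITION & SPEC =====
-- Pre_ excludes exactly the inputs where Python A raises: a non-source node whose info has no
-- 'category' entry or an empty category list (KeyError / IndexError).
def Pre_map_cat_to_objects (cats : List String) (graph : List (String × List (String × List String))) (source_node : String) : Prop :=
  ∀ p ∈ graph, p.1 ≠ source_node → ((PySem.Dict.mk p.2).get? "category").getD [] ≠ []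
instance (cats : List String) (graph : List (String × List (String × List String))) (source_node : String) : Decidable (Pre_map_cat_to_objects cats graph source_node) := by unfold Pre_map_cat_to_objects; infer_instance

def pvWitness_map_cat_to_objects : List String × (List (String × List (String × List String))) × String :=
  (["a", "b"], [("n", [("category", ["a"])]), ("m", [("category", ["c"])]), ("s", [])], "s")

def Spec_map_cat_to_objects (cats : List String) (graph : List (String × List (String × List String))) (source_node : String) (out : List (String × List String)) : Prop := out = map_cat_to_objects_alt cats graph source_node
instance (cats : List String) (graph : List (String × List (String × List String))) (source_node : String) (out : List (String × List String)) : Decidable (Spec_map_cat_to_objects cats graph source_node out) := by unfold Spec_map_cat_to_objects; infer_instance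

-- ===== CLAIM (what is proved, stated in full; the proofs are below) =====
def Claim_equal_map_cat_to_objects : Prop := ∀ (cats : List String) (graph : List (String × List (String × List String))) (source_node : String), Dom_map_cat_to_objects cats graph source_node → Pre_map_cat_to_objects cats graph source_node → Spec_map_cat_to_objects cats graph source_node (map_cat_to_objects cats graph source_node)


-- ===== LEMMAS AND PROOFS =====
-- A's grouping loop, run from any dict whose key set is exactly cats, appends to each key's value
-- exactly the per-key filtered node list (B's inner comprehension).
theorem pv_loop (source_node : String) (cats : List String)
    (graph : List (String × List (String × List String)))
    (d : PySem.Dict String (List String))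
    (hnd : d.keys.Nodup)
    (hc : ∀ c, d.contains c = decide (c ∈ cats)) :
    (graph.foldl (fun d p =>
        if p.1 ≠ source_node then
          if pvCatOf p.2 ∈ cats then d.modify (pvCatOf p.2) [] (· ++ [p.1]) else d
        else d) d).items
      = d.items.map (fun kv => (kv.1, kv.2 ++ (graph.filter (fun p => p.1 ≠ source_node ∧ pvCatOf p.2 = kv.1)).map (·.1))) := by
  induction graph generalizing d with
  | nil => simp
  | cons p rest ih =>
    simp only [List.foldl_cons]
    by_cases hsrc : p.1 ≠ source_node
    · by_cases hcat : pvCatOf p.2 ∈ cats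
      · rw [if_pos hsrc, if_pos hcat]
        have hcon : d.contains (pvCatOf p.2) = true := by rw [hc]; simpa using hcat
        have hmod : d.modify (pvCatOf p.2) [] (· ++ [p.1])
            = d.insert (pvCatOf p.2) (d.getD (pvCatOf p.2) [] ++ [p.1]) := rfl
        rw [hmod]
        have hnd' : (d.insert (pvCatOf p.2) (d.getD (pvCatOf p.2) [] ++ [p.1])).keys.Nodup := by
          rw [PySem.Dict.keys_insert_of_contains _ _ hcon]; exact hnd
        have hc' : ∀ c, (d.insert (pvCatOf p.2) (d.getD (pvCatOf p.2) [] ++ [p.1])).contains c = decide (c ∈ cats) := by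
          intro c
          rw [PySem.Dict.contains_insert]
          by_cases hcq : c = pvCatOf p.2
          · simp [hcq, hcat]
          · simp [hcq, hc c]
        rw [ih _ hnd' hc']
        rw [PySem.Dict.items_insert_of_contains _ _ hcon, List.map_map]
        apply List.map_congr_left
        intro kv hkv
        obtain ⟨k, v⟩ := kv
        simp only [Function.comp_apply]
        by_cases hq : k = pvCatOf p.2
        · subst hq
          have hg := PySem.Dict.getD_of_mem_items _ hkv hnd ([] : List String)
          simp [hsrc, hg, List.append_assoc]
        · have hne : ¬(pvCatOf p.2 = k) := fun h => hq h.symm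
          simp [hsrc, hq, hne]
      · rw [if_pos hsrc, if_neg hcat]
        rw [ih _ hnd hc]
        apply List.map_congr_left
        intro kv hkv
        have hmem : kv.1 ∈ cats := by
          have h1 : d.contains kv.1 = true :=
            (PySem.Dict.contains_iff_mem_keys _ _).2 (PySem.Dict.mem_keys_of_mem_items _ hkv)
          rw [hc] at h1; simpa using h1
        have hne : pvCatOf p.2 ≠ kv.1 := fun h => hcat (h ▸ hmem)
        simp [hsrc, hne]
    · rw [if_neg hsrc]
      rw [ih _ hnd hc]
      apply List.map_congr_left
      intro kv hkv
      simp [hsrc]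

-- the two dict-comprehension folds stay related key-for-key: B's initialisation with f c equals
-- A's initialisation with [] mapped through (k, v) ↦ (k, f k)
theorem pv_init (f : String → List String) (cats : List String)
    (d1 d2 : PySem.Dict String (List String))
    (h : d2.items = d1.items.map (fun kv => (kv.1, f kv.1))) :
    (cats.foldl (fun d c => d.insert c (f c)) d2).items
      = (cats.foldl (fun d c => d.insert c ([] : List String)) d1).items.map (fun kv => (kv.1, f kv.1)) := by
  induction cats generalizing d1 d2 with
  | nil => simpa using h
  | cons c cs ih =>
    simp only [List.foldl_cons]
    apply ih
    have hkeys : d2.keys = d1.keys := by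
      simp only [PySem.Dict.keys, h, List.map_map]
      rfl
    have hk : d2.contains c = d1.contains c := by
      rw [PySem.Dict.contains_eq_decide_mem_keys, PySem.Dict.contains_eq_decide_mem_keys, hkeys]
    rw [PySem.Dict.items_insert, PySem.Dict.items_insert, hk]
    by_cases hcon : d1.contains c = true
    · simp only [hcon, if_true, h, List.map_map]
      apply List.map_congr_left
      intro kv _
      by_cases hq : kv.1 = c <;> simp [hq]
    · simp [hcon, h]

theorem pv_d0_vals (cats : List String) (d : PySem.Dict String (List String))
    (h : ∀ kv ∈ d.items, kv.2 = ([] : List String)) :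
    ∀ kv ∈ (cats.foldl (fun d c => d.insert c ([] : List String)) d).items, kv.2 = ([] : List String) := by
  induction cats generalizing d with
  | nil => simpa using h
  | cons c cs ih =>
    simp only [List.foldl_cons]
    apply ih
    intro kv hkv
    rcases (PySem.Dict.mem_items_insert _ _ _ _).1 hkv with h1 | ⟨h2, _⟩
    · simp [h1]
    · exact h kv h2

-- ===== VERDICT (by name: the statement is the Claim_ definition above) =====
theorem map_cat_to_objects_spec : Claim_equal_map_cat_to_objects := by
  intro cats graph source_node _ _
  unfold Spec_map_cat_to_objects map_cat_to_objects map_cat_to_objects_alt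
  have hnd : (cats.foldl (fun d c => d.insert c ([] : List String)) PySem.Dict.empty).keys.Nodup :=
    PySem.Dict.nodup_keys_foldl_insert _ _ _ PySem.Dict.nodup_keys_empty
  have hkeys : (cats.foldl (fun d c => d.insert c ([] : List String)) PySem.Dict.empty).keys
      = PySem.Set.ofList cats := by
    rw [PySem.Dict.keys_foldl_insert, PySem.Dict.keys_empty, PySem.Set.update_nil_left]
  have hc : ∀ c, (cats.foldl (fun d c => d.insert c ([] : List String)) PySem.Dict.empty).contains c
      = decide (c ∈ cats) := by
    intro c
    rw [PySem.Dict.contains_eq_decide_mem_keys, hkeys]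
    simp [PySem.Set.mem_ofList]
  rw [pv_loop source_node cats graph _ hnd hc,
    pv_init (fun c => (graph.filter (fun p => p.1 ≠ source_node ∧ pvCatOf p.2 = c)).map (·.1))
      cats PySem.Dict.empty PySem.Dict.empty rfl]
  apply List.map_congr_left
  intro kv hkv
  rw [pv_d0_vals cats PySem.Dict.empty (by intro kv h; exact absurd h (List.not_mem_nil)) kv hkv]
  simp
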